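-- pv_equiv track=rewrite | github.com/jwz-ecust/ecust_py | everyday/cookbook/ppp.py | solution
-- ===== SOURCE A (Python) =====
-- from collections import Counter
-- from collections import defaultdict
--
-- def solution(A):
--     c = Counter(A)
--     repeat = [i for i in c if c[i] > 1]
--     ddict = defaultdict(list)
--     for i in range(len(A)):
--         ddict[A[i]].append(i)
--     dis = [max(ddict[i]) -  min(ddict[i]) for i in ddict if len(ddict[i]) > 1]
--     return max(dis)
-- ===== SOURCE B (Python) =====
-- def solution(A):
--     first = {}
--     gaps = []
--     for i, v in enumerate(A):
--         if v in first:
--             gaps.append(i - first[v])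
--         else:
--             first[v] = i
--     return max(gaps)
-- ===== Notes on version B (the rewrite author's own statement) =====
-- stated objective: simpler
-- what changed: B replaces A's Counter + defaultdict-of-full-index-lists + per-value max/min passes (and A's dead 'repeat' list) by one pass that stores only each value's first index and appends i - first[v] at every later occurrence; max(gaps) is the same answer because each value's largest gap (last minus first occurrence) is among the appended gaps and bounds the others; Pre_ excludes lists without any repeated element, on which both A and B raise ValueError (max of an empty list).
import Mathlib
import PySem

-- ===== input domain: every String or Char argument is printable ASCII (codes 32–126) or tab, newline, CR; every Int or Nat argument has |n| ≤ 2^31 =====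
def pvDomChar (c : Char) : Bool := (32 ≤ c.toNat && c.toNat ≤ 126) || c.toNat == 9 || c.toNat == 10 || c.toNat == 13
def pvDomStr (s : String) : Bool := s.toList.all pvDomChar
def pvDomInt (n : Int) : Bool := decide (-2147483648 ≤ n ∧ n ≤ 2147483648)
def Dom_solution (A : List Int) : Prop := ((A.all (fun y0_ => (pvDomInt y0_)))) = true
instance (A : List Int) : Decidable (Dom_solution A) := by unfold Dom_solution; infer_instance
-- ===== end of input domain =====

-- B replaces A's Counter + defaultdict of full index lists + per-value max/min passes by a
-- single pass that keeps only each value's first index and collects i - first[v] at every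
-- later occurrence, then takes max(gaps); objective: simpler.

-- ===== PORT A =====
def solution (A : List Int) : Int :=
  let c := PySem.Dict.counter A
  let _repeat := c.keys.filter (fun i => c.getD i 0 > 1)
  let ddict := (PySem.List.pyRange 0 (A.length : Int) 1).foldl
      (fun d i => d.modify (PySem.List.pyGetD A i 0) [] (fun l => l ++ [i])) PySem.Dict.empty
  let dis := (ddict.keys.filter (fun v => (ddict.getD v []).length > 1)).map
      (fun v => (PySem.List.max? (ddict.getD v []) (fun x => x)).getD 0
              - (PySem.List.min? (ddict.getD v []) (fun x => x)).getD 0)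
  (PySem.List.max? dis (fun x => x)).getD 0

-- ===== PORT B =====
def solution_alt (A : List Int) : Int :=
  let st := (PySem.List.enumerate A 0).foldl
      (fun (st : PySem.Dict Int Int × List Int) p =>
        match st.1.get? p.2 with
        | some k => (st.1, st.2 ++ [p.1 - k])
        | none => (st.1.insert p.2 p.1, st.2))
      (PySem.Dict.empty, [])
  (PySem.List.max? st.2 (fun x => x)).getD 0

-- ===== PRECONDITION & SPEC =====
-- Pre_ excludes lists with no repeated element: there the Python A raises ValueError (max of an empty list), and so does B.
def Pre_solution (A : List Int) : Prop := ¬ A.Nodup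
instance (A : List Int) : Decidable (Pre_solution A) := by unfold Pre_solution; infer_instance
def pvWitness_solution : List Int := [1, 2, 1]
def Spec_solution (A : List Int) (out : Int) : Prop := out = solution_alt A
instance (A : List Int) (out : Int) : Decidable (Spec_solution A out) := by unfold Spec_solution; infer_instance

-- ===== CLAIM (what is proved, stated in full; the proofs are below) =====
def Claim_equal_solution : Prop := ∀ (A : List Int), Dom_solution A → Pre_solution A → Spec_solution A (solution A)

-- ===== LEMMAS AND PROOFS =====

-- the list of indices (as Ints, offset s) at which v occurs in A
def idxs (A : List Int) (s v : Int) : List Int :=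
  ((PySem.List.enumerate A s).filter (fun p => p.2 == v)).map (fun p => p.1)

lemma mem_idxs (A : List Int) (s v j : Int) :
    j ∈ idxs A s v ↔ ∃ (k : Nat) (_ : k < A.length), j = s + k ∧ A[k] = v := by
  simp only [idxs, List.mem_map, List.mem_filter, PySem.List.mem_enumerate_iff]
  constructor
  · rintro ⟨p, ⟨⟨k, hk, rfl⟩, hpv⟩, rfl⟩
    simp only [beq_iff_eq] at hpv
    exact ⟨k, hk, rfl, hpv⟩
  · rintro ⟨k, hk, rfl, hv⟩
    exact ⟨(s + k, A[k]), ⟨⟨k, hk, rfl⟩, by simp [hv]⟩, rfl⟩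

lemma length_idxs (A : List Int) (s v : Int) :
    (idxs A s v).length = A.count v := by
  induction A generalizing s with
  | nil => simp [idxs]
  | cons a t ih =>
      simp only [idxs, PySem.List.enumerate_cons, List.filter_cons] at *
      by_cases h : a = v
      · simp [h, ih (s + 1)]
      · simp [h, ih (s + 1)]

lemma pairwise_idxs (A : List Int) (s v : Int) :
    (idxs A s v).Pairwise (· < ·) := by
  apply List.Pairwise.map
  · exact fun p q h => h
  · exact List.Pairwise.sublist List.filter_sublist (PySem.List.pairwise_lt_enumerate A s)

lemma min?_id_eq_of (xs : List Int) (m : Int) (hm : m ∈ xs) (hb : ∀ y ∈ xs, m ≤ y) :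
    PySem.List.min? xs (fun x => x) = some m := by
  cases h : PySem.List.min? xs (fun x => x) with
  | none => rw [PySem.List.min?_eq_none_iff] at h; subst h; cases hm
  | some m' =>
      have h1 := PySem.List.min?_mem h
      have h2 := PySem.List.min?_isMin h m hm
      have h3 := hb m' h1
      have : m' = m := le_antisymm h2 h3
      rw [this]

lemma max?_id_eq_of (xs : List Int) (m : Int) (hm : m ∈ xs) (hb : ∀ y ∈ xs, y ≤ m) :
    PySem.List.max? xs (fun x => x) = some m := by
  cases h : PySem.List.max? xs (fun x => x) with
  | none => rw [PySem.List.max?_eq_none_iff] at h; subst h; cases hm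
  | some m' =>
      have h1 := PySem.List.max?_mem h
      have h2 := PySem.List.max?_isMax h m hm
      have h3 := hb m' h1
      have : m' = m := le_antisymm h3 h2
      rw [this]

lemma min_idxs (A : List Int) (v : Int) (k : Nat) (hk : PySem.List.index? A v = some k) :
    PySem.List.min? (idxs A 0 v) (fun x => x) = some (k : Int) := by
  obtain ⟨hklt, hAk, hfirst⟩ := PySem.List.getElem_of_index?_eq_some hk
  apply min?_id_eq_of
  · rw [mem_idxs]; exact ⟨k, hklt, by omega, hAk⟩
  · intro y hy
    rw [mem_idxs] at hy
    obtain ⟨k', hk', rfl, hAk'⟩ := hy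
    have : ¬ k' < k := fun h => hfirst k' h hAk'
    omega

-- A's grouping dict, named for the proofs (definitionally the fold in `solution`)
def ddictOf (A : List Int) : PySem.Dict Int (List Int) :=
  (PySem.List.pyRange 0 (A.length : Int) 1).foldl
      (fun d i => d.modify (PySem.List.pyGetD A i 0) [] (fun l => l ++ [i])) PySem.Dict.empty

lemma ddictOf_eq (A : List Int) :
    ddictOf A = ((PySem.List.enumerate A 0).map (fun p => (p.2, p.1))).foldl
      (fun d p => d.modify p.1 [] (fun l => l ++ [p.2])) PySem.Dict.empty := by
  rw [ddictOf, List.foldl_map, PySem.List.enumerate_eq_map_pyRange A 0, List.foldl_map]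
  simp [PySem.List.len_eq]

lemma getD_ddictOf (A : List Int) (v : Int) :
    (ddictOf A).getD v [] = idxs A 0 v := by
  rw [ddictOf_eq, PySem.Dict.getD_foldl_modify_append]
  simp [idxs, List.filter_map, Function.comp_def]

-- B's loop body and its unfolding into a pure recursion
def bStep (st : PySem.Dict Int Int × List Int) (p : Int × Int) :
    PySem.Dict Int Int × List Int :=
  match st.1.get? p.2 with
  | some k => (st.1, st.2 ++ [p.1 - k])
  | none => (st.1.insert p.2 p.1, st.2)

def gpure : List (Int × Int) → PySem.Dict Int Int → List Int
  | [], _ => []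
  | p :: rest, d =>
      match d.get? p.2 with
      | some k => (p.1 - k) :: gpure rest d
      | none => gpure rest (d.insert p.2 p.1)

lemma foldl_bStep (items : List (Int × Int)) (d : PySem.Dict Int Int) (g : List Int) :
    (items.foldl bStep (d, g)).2 = g ++ gpure items d := by
  induction items generalizing d g with
  | nil => simp [gpure]
  | cons p rest ih =>
      simp only [List.foldl_cons, gpure, bStep]
      cases h : d.get? p.2 with
      | some k => simp [ih]
      | none => simp [ih]

-- the closed form of B's gaps list
def gapsOf (A : List Int) : List Int :=
  (PySem.List.enumerate A 0).filterMap
    (fun p => (PySem.List.index? A p.2).bind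
        (fun k => if (k : Int) < p.1 then some (p.1 - (k : Int)) else none))

lemma gpure_eq (F : List Int) :
    ∀ (S P : List Int) (d : PySem.Dict Int Int),
      F = P ++ S →
      (∀ v : Int, d.get? v = if v ∈ P then (PySem.List.index? F v).map (fun k => (k : Int)) else none) →
      gpure (PySem.List.enumerate S (P.length : Int)) d
        = (PySem.List.enumerate S (P.length : Int)).filterMap
            (fun p => (PySem.List.index? F p.2).bind
                (fun k => if (k : Int) < p.1 then some (p.1 - (k : Int)) else none)) := by
  intro S
  induction S with
  | nil => intro P d _ _; simp [PySem.List.enumerate_nil, gpure]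
  | cons a rest ih =>
      intro P d hF hd
      rw [PySem.List.enumerate_cons]
      by_cases ha : a ∈ P
      · -- a already seen: index? F a = index? P a, first index < P.length
        have hPa : PySem.List.index? F a = PySem.List.index? P a := by
          rw [hF]; exact PySem.List.index?_append_of_mem _ ha
        obtain ⟨k, hk⟩ := Option.isSome_iff_exists.mp
          ((PySem.List.index?_isSome_iff P a).mpr ha)
        have hklt : k < P.length := by
          obtain ⟨h1, _, _⟩ := PySem.List.getElem_of_index?_eq_some hk
          exact h1
        have hda : d.get? a = some (k : Int) := by
          rw [hd a, if_pos ha, hPa, hk]; rfl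
        have hFk : PySem.List.index? F a = some k := by rw [hPa, hk]
        simp only [gpure, hda, List.filterMap_cons, hFk, Option.bind_some]
        rw [if_pos (by omega)]
        have : gpure (PySem.List.enumerate rest ((P.length : Int) + 1)) d
            = (PySem.List.enumerate rest ((P.length : Int) + 1)).filterMap
                (fun p => (PySem.List.index? F p.2).bind
                    (fun k => if (k : Int) < p.1 then some (p.1 - (k : Int)) else none)) := by
          have h1 : F = (P ++ [a]) ++ rest := by rw [hF]; simp
          have h2 : ∀ v : Int, d.get? v =
              if v ∈ P ++ [a] then (PySem.List.index? F v).map (fun k => (k : Int)) else none := by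
            intro v
            rw [hd v]
            by_cases hv : v ∈ P
            · rw [if_pos hv, if_pos (by simp [hv])]
            · rw [if_neg hv]
              by_cases hv2 : v ∈ P ++ [a]
              · have hva : v = a := by
                  rcases List.mem_append.mp hv2 with h | h
                  · exact absurd h hv
                  · simpa using h
                rw [if_pos hv2, hva, hFk]
                exact absurd (hva ▸ ha) hv
              · rw [if_neg hv2]
          have := ih (P ++ [a]) d h1 h2
          simpa [List.length_append, Nat.cast_add] using this
        rw [this]
      · -- first occurrence of a: dict gets a ↦ P.length, index? F a = P.length
        have hda : d.get? a = none := by rw [hd a, if_neg ha]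
        have hFa : PySem.List.index? F a = some P.length := by
          rw [hF]
          have : PySem.List.index? (P ++ a :: rest) a
              = PySem.List.index? (P ++ [a] ++ rest) a := by simp
          rw [this, PySem.List.index?_append_of_mem _ (by simp),
            PySem.List.index?_append_singleton_self P a ha]
        simp only [gpure, hda, List.filterMap_cons, hFa, Option.bind_some]
        rw [if_neg (by omega)]
        have h1 : F = (P ++ [a]) ++ rest := by rw [hF]; simp
        have h2 : ∀ v : Int, (d.insert a (P.length : Int)).get? v =
            if v ∈ P ++ [a] then (PySem.List.index? F v).map (fun k => (k : Int)) else none := by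
          intro v
          rw [PySem.Dict.get?_insert]
          by_cases hva : v = a
          · rw [if_pos hva, if_pos (by simp [hva]), hva, hFa]; rfl
          · rw [if_neg hva, hd v]
            by_cases hv : v ∈ P
            · rw [if_pos hv, if_pos (by simp [hv])]
            · rw [if_neg hv, if_neg (by simp [hv, hva])]
        have := ih (P ++ [a]) (d.insert a (P.length : Int)) h1 h2
        simpa [List.length_append, Nat.cast_add] using this

lemma gaps_closed (A : List Int) :
    ((PySem.List.enumerate A 0).foldl bStep (PySem.Dict.empty, [])).2 = gapsOf A := by
  rw [foldl_bStep, List.nil_append, gapsOf]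
  have := gpure_eq A A [] PySem.Dict.empty (by simp) (by intro v; simp [PySem.Dict.get?_empty])
  simpa using this

lemma mem_gapsOf (A : List Int) (g : Int) :
    g ∈ gapsOf A ↔ ∃ (j : Nat) (_ : j < A.length) (k : Nat),
      PySem.List.index? A A[j] = some k ∧ k < j ∧ g = (j : Int) - k := by
  simp only [gapsOf, List.mem_filterMap, PySem.List.mem_enumerate_iff]
  constructor
  · rintro ⟨p, ⟨j, hj, rfl⟩, hopt⟩
    cases hix : PySem.List.index? A A[j] with
    | none => rw [hix] at hopt; simp at hopt
    | some k =>
        rw [hix, Option.bind_some] at hopt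
        split_ifs at hopt with hlt
        simp only [Option.some_inj] at hopt
        exact ⟨j, hj, k, hix, by omega, by omega⟩
  · rintro ⟨j, hj, k, hix, hkj, rfl⟩
    refine ⟨(0 + (j : Int), A[j]), ⟨j, hj, rfl⟩, ?_⟩
    rw [hix, Option.bind_some, if_pos (by push_cast; omega)]
    congr 1
    omega

-- A's dis list, named
def disOf (A : List Int) : List Int :=
  ((ddictOf A).keys.filter (fun v => ((ddictOf A).getD v []).length > 1)).map
    (fun v => (PySem.List.max? ((ddictOf A).getD v []) (fun x => x)).getD 0
            - (PySem.List.min? ((ddictOf A).getD v []) (fun x => x)).getD 0)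

lemma mem_disOf_of_count (A : List Int) (v : Int) (hv : 1 < A.count v) :
    ((PySem.List.max? (idxs A 0 v) (fun x => x)).getD 0
      - (PySem.List.min? (idxs A 0 v) (fun x => x)).getD 0) ∈ disOf A := by
  have hkeys : (ddictOf A).keys = PySem.List.dedup A := by
    rw [ddictOf_eq, PySem.Dict.keys_foldl_modify_key (key := fun p : Int × Int => p.1)
        (d0 := ([] : List Int)) (f := fun _ p => (fun l => l ++ [p.2]))]
    simp only [List.map_map, Function.comp_def]
    have : (PySem.List.enumerate A 0).map (fun p => p.2) = A := PySem.List.map_snd_enumerate A 0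
    rw [this, PySem.List.dedup_eq_ofList, PySem.Set.ofList_eq_foldl]
    rfl
  have hvA : v ∈ A := List.count_pos_iff.mp (by omega)
  apply List.mem_map.mpr
  refine ⟨v, List.mem_filter.mpr ⟨?_, ?_⟩, by rw [getD_ddictOf]⟩
  · rw [hkeys]; rw [PySem.List.dedup_eq_ofList]; exact (PySem.Set.mem_ofList _ _).mpr hvA
  · rw [getD_ddictOf]; simp [length_idxs, hv]

-- characterize membership of dis elements
lemma disOf_elem (A : List Int) (x : Int) (hx : x ∈ disOf A) :
    ∃ v : Int, 1 < A.count v ∧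
      x = (PySem.List.max? (idxs A 0 v) (fun x => x)).getD 0
        - (PySem.List.min? (idxs A 0 v) (fun x => x)).getD 0 := by
  obtain ⟨v, hvf, rfl⟩ := List.mem_map.mp hx
  have hc := (List.mem_filter.mp hvf).2
  rw [getD_ddictOf] at hc ⊢
  refine ⟨v, ?_, rfl⟩
  have : 1 < (idxs A 0 v).length := by simpa using hc
  rwa [length_idxs] at this

lemma gap_le_dis (A : List Int) (g : Int) (hg : g ∈ gapsOf A) :
    ∃ x ∈ disOf A, g ≤ x := by
  obtain ⟨j, hj, k, hix, hkj, rfl⟩ := (mem_gapsOf A g).mp hg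
  set v := A[j] with hv
  obtain ⟨hklt, hAk, _⟩ := PySem.List.getElem_of_index?_eq_some hix
  -- v occurs at k and at j, k ≠ j, so count ≥ 2
  have hkmem : (k : Int) ∈ idxs A 0 v := (mem_idxs A 0 v k).mpr ⟨k, hklt, by omega, hAk⟩
  have hjmem : (j : Int) ∈ idxs A 0 v := (mem_idxs A 0 v j).mpr ⟨j, hj, by omega, rfl⟩
  have hcnt : 1 < A.count v := by
    rw [← length_idxs A 0 v]
    rcases h : idxs A 0 v with - | ⟨x, - | ⟨y, t⟩⟩
    · rw [h] at hkmem; cases hkmem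
    · rw [h] at hkmem hjmem
      simp only [List.mem_singleton] at hkmem hjmem
      omega
    · simp
  cases hmx : PySem.List.max? (idxs A 0 v) (fun x => x) with
  | none =>
      rw [PySem.List.max?_eq_none_iff] at hmx
      rw [hmx] at hjmem; cases hjmem
  | some mx =>
      refine ⟨_, mem_disOf_of_count A v hcnt, ?_⟩
      rw [hmx, min_idxs A v k hix]
      have hjle : (j : Int) ≤ mx := PySem.List.max?_isMax hmx _ hjmem
      simp only [Option.getD_some]
      omega

lemma dis_mem_gaps (A : List Int) (x : Int) (hx : x ∈ disOf A) : x ∈ gapsOf A := by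
  obtain ⟨v, hcnt, rfl⟩ := disOf_elem A x hx
  have hvA : v ∈ A := List.count_pos_iff.mp (by omega)
  obtain ⟨k, hix⟩ := Option.isSome_iff_exists.mp ((PySem.List.index?_isSome_iff A v).mpr hvA)
  have hmin := min_idxs A v k hix
  -- idxs has length ≥ 2 and is pairwise <, so min < max
  have hlen : 1 < (idxs A 0 v).length := by rwa [length_idxs]
  obtain ⟨a, b, t, hab⟩ : ∃ a b t, idxs A 0 v = a :: b :: t := by
    rcases h : idxs A 0 v with - | ⟨a, - | ⟨b, t⟩⟩ <;> simp [h] at hlen ⊢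
  have hpw := pairwise_idxs A 0 v
  rw [hab] at hpw
  have haltb : a < b := (List.pairwise_cons.mp hpw).1 b (by simp)
  cases hmx : PySem.List.max? (idxs A 0 v) (fun x => x) with
  | none =>
      rw [PySem.List.max?_eq_none_iff] at hmx
      rw [hmx] at hab; cases hab
  | some mx =>
      have hmxmem := PySem.List.max?_mem hmx
      have hble : b ≤ mx := PySem.List.max?_isMax hmx b (by rw [hab]; simp)
      have hale : (k : Int) ≤ a := PySem.List.min?_isMin hmin a (by rw [hab]; simp)
      have hkltmx : (k : Int) < mx := by omega
      obtain ⟨jm, hjm, hmxeq, hAjm⟩ := (mem_idxs A 0 v mx).mp hmxmem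
      rw [hmin]
      simp only [Option.getD_some]
      rw [mem_gapsOf]
      refine ⟨jm, hjm, k, by rw [hAjm]; exact hix, by omega, by omega⟩

lemma max_gaps_eq_max_dis (A : List Int) (h : ¬ A.Nodup) :
    (PySem.List.max? (gapsOf A) (fun x => x)).getD 0
      = (PySem.List.max? (disOf A) (fun x => x)).getD 0 := by
  -- dis is nonempty
  obtain ⟨v, hv⟩ : ∃ v : Int, 1 < A.count v := by
    by_contra hc
    refine h (List.nodup_iff_count_le_one.mpr fun a => ?_)
    by_contra hca
    exact hc ⟨a, by omega⟩
  have hne : disOf A ≠ [] := by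
    intro hnil
    have := mem_disOf_of_count A v hv
    rw [hnil] at this; cases this
  cases hM : PySem.List.max? (disOf A) (fun x => x) with
  | none =>
      rw [PySem.List.max?_eq_none_iff] at hM
      exact absurd hM hne
  | some M =>
  have hMmem := PySem.List.max?_mem hM
  have hMgaps : M ∈ gapsOf A := dis_mem_gaps A M hMmem
  have hbound : ∀ g ∈ gapsOf A, g ≤ M := by
    intro g hg
    obtain ⟨x, hx, hgx⟩ := gap_le_dis A g hg
    have := PySem.List.max?_isMax hM x hx
    omega
  rw [max?_id_eq_of (gapsOf A) M hMgaps hbound]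

-- ===== VERDICT (by name: the statement is the Claim_ definition above) =====
theorem solution_spec : Claim_equal_solution := by
  intro A _ hpre
  show solution A = solution_alt A
  have hA : solution A = (PySem.List.max? (disOf A) (fun x => x)).getD 0 := rfl
  have hB : solution_alt A
      = (PySem.List.max? (((PySem.List.enumerate A 0).foldl bStep
          (PySem.Dict.empty, [])).2) (fun x => x)).getD 0 := rfl
  rw [hA, hB, gaps_closed A, max_gaps_eq_max_dis A hpre]
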